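-- pv_equiv track=rewrite | github.com/kaurkhushwinder/leaveChecker | model_service.py | _connected_component_areas
-- ===== SOURCE A (Python) =====
-- def _connected_component_areas(mask: list[bool], width: int, height: int) -> list[int]:
--     """Return areas for all connected components in a boolean mask."""
--
--     def index(x: int, y: int) -> int:
--         return y * width + x
--
--     visited = [False] * (width * height)
--     areas: list[int] = []
--
--     for y in range(height):
--         for x in range(width):
--             start = index(x, y)
--             if visited[start] or not mask[start]:
--                 continue
--
--             stack = [start]
--             visited[start] = True
--             area = 0
--
--             while stack:
--                 current = stack.pop()
--                 area += 1
--                 cx = current % width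
--                 cy = current // width
--
--                 for ny in range(max(0, cy - 1), min(height, cy + 2)):
--                     for nx in range(max(0, cx - 1), min(width, cx + 2)):
--                         nxt = index(nx, ny)
--                         if not visited[nxt] and mask[nxt]:
--                             visited[nxt] = True
--                             stack.append(nxt)
--
--             areas.append(area)
--
--     return areas
-- ===== SOURCE B (Python) =====
-- def _connected_component_areas(mask: list[bool], width: int, height: int) -> list[int]:
--     """Return areas for all connected components in a boolean mask."""
--     if width <= 0 or height <= 0:
--         return []
--     n = width * height
--     seen = set()
--     areas: list[int] = []
--     for start in range(n):
--         if start in seen or not mask[start]: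
--             continue
--         comp = {start}
--         frontier = [start]
--         while frontier:
--             new: list[int] = []
--             for cur in frontier:
--                 cx = cur % width
--                 cy = cur // width
--                 for ny in range(max(0, cy - 1), min(height, cy + 2)):
--                     for nx in range(max(0, cx - 1), min(width, cx + 2)):
--                         j = ny * width + nx
--                         if mask[j] and j not in comp:
--                             comp.add(j)
--                             new.append(j)
--             frontier = new
--         areas.append(len(comp))
--         seen |= comp
--     return areas
-- ===== Notes on version B (the rewrite author's own statement) =====
-- stated objective: alternative
-- what changed: Replaces A's nested y/x scan with an explicit DFS stack mutating a preallocated visited array by a single flat row-major pixel loop that grows each component with level-synchronous frontier expansion over sets (comp/seen), taking the area as len(comp) instead of counting stack pops.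
import Mathlib
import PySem

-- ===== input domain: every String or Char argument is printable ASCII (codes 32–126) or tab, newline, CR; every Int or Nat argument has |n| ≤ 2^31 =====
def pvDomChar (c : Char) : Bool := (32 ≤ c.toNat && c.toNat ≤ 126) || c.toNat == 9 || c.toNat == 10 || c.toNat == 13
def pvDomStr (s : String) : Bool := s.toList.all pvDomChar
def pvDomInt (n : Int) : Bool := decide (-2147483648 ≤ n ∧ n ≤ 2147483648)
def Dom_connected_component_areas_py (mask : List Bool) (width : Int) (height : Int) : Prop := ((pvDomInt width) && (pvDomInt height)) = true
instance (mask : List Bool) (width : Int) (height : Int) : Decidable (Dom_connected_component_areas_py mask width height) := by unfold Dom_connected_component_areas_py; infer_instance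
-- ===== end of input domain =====

-- B replaces A's explicit-stack DFS flood fill over a mutable visited array by a flat
-- row-major scan with level-synchronous frontier expansion over sets (alternative algorithm, same cost).

-- ===== PORT A =====
-- the 'while stack:' loop; fuel is a totality guard only (proved sufficient in the lemmas below)
def aWhile (mask : List Bool) (width height : Int) : Nat → List Bool → List Int → Int → (List Bool × Int)
  | 0, visited, _, area => (visited, area)
  | fuel+1, visited, stack, area =>
    match PySem.List.pop? stack with
    | none => (visited, area)
    | some (current, stack) =>
      let area := area + 1
      let cx := PySem.Int.mod current width
      let cy := PySem.Int.floordiv current width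
      let s := (PySem.List.pyRange (max 0 (cy-1)) (min height (cy+2))).foldl (fun (s : List Bool × List Int) ny =>
        (PySem.List.pyRange (max 0 (cx-1)) (min width (cx+2))).foldl (fun s nx =>
          let nxt := ny*width + nx
          if !(PySem.List.pyGetD s.1 nxt false) && PySem.List.pyGetD mask nxt false then
            (PySem.List.pySetD s.1 nxt true, s.2 ++ [nxt])
          else s) s) (visited, stack)
      aWhile mask width height fuel s.1 s.2 area

def connected_component_areas_py (mask : List Bool) (width : Int) (height : Int) : List Int :=
  let visited := List.replicate (width*height).toNat false
  ((PySem.List.pyRange 0 height).foldl (fun (s : List Bool × List Int) y =>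
    (PySem.List.pyRange 0 width).foldl (fun (s : List Bool × List Int) x =>
      let start := y*width + x
      if PySem.List.pyGetD s.1 start false || !(PySem.List.pyGetD mask start false) then s
      else
        let r := aWhile mask width height ((width*height).toNat + 1) (PySem.List.pySetD s.1 start true) [start] 0
        (r.1, s.2 ++ [r.2])) s) (visited, ([] : List Int))).2

-- ===== PORT B =====
-- the 'while frontier:' loop of B; fuel is a totality guard only
def bWhile (mask : List Bool) (width height : Int) : Nat → PySem.Set Int → List Int → PySem.Set Int
  | 0, comp, _ => comp
  | fuel+1, comp, frontier =>
    if frontier.isEmpty then comp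
    else
      let s := frontier.foldl (fun (s : PySem.Set Int × List Int) cur =>
        let cx := PySem.Int.mod cur width
        let cy := PySem.Int.floordiv cur width
        (PySem.List.pyRange (max 0 (cy-1)) (min height (cy+2))).foldl (fun (s : PySem.Set Int × List Int) ny =>
          (PySem.List.pyRange (max 0 (cx-1)) (min width (cx+2))).foldl (fun (s : PySem.Set Int × List Int) nx =>
            let j := ny*width + nx
            if PySem.List.pyGetD mask j false && !(PySem.Set.contains s.1 j) then
              (PySem.Set.add s.1 j, s.2 ++ [j])
            else s) s) s) (comp, ([] : List Int))
      bWhile mask width height fuel s.1 s.2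

def connected_component_areas_py_alt (mask : List Bool) (width : Int) (height : Int) : List Int :=
  if width ≤ 0 ∨ height ≤ 0 then [] else
  let n := width * height
  ((PySem.List.pyRange 0 n).foldl (fun (s : PySem.Set Int × List Int) start =>
    if PySem.Set.contains s.1 start || !(PySem.List.pyGetD mask start false) then s
    else
      let comp := bWhile mask width height (n.toNat + 2) (PySem.Set.ofList [start]) [start]
      (PySem.Set.union s.1 comp, s.2 ++ [PySem.Set.len comp])) (PySem.Set.empty, ([] : List Int))).2

-- ===== PRECONDITION & SPEC =====
-- Pre_ excludes exactly the inputs where Python A raises IndexError: a positive grid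
-- whose mask is shorter than width*height pixels.
def Pre_connected_component_areas_py (mask : List Bool) (width : Int) (height : Int) : Prop :=
  0 < width → 0 < height → width * height ≤ PySem.List.len mask
instance (mask : List Bool) (width : Int) (height : Int) : Decidable (Pre_connected_component_areas_py mask width height) := by unfold Pre_connected_component_areas_py; infer_instance

def pvWitness_connected_component_areas_py : List Bool × Int × Int := ([true, false, true, true], 2, 2)

def Spec_connected_component_areas_py (mask : List Bool) (width : Int) (height : Int) (out : List Int) : Prop := out = connected_component_areas_py_alt mask width height
instance (mask : List Bool) (width : Int) (height : Int) (out : List Int) : Decidable (Spec_connected_component_areas_py mask width height out) := by unfold Spec_connected_component_areas_py; infer_instance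

-- ===== CLAIM (what is proved, stated in full; the proofs are below) =====
def Claim_equal_connected_component_areas_py : Prop := ∀ (mask : List Bool) (width : Int) (height : Int), Dom_connected_component_areas_py mask width height → Pre_connected_component_areas_py mask width height → Spec_connected_component_areas_py mask width height (connected_component_areas_py mask width height)

-- ===== LEMMAS AND PROOFS =====

def nbrs (w h : Int) (u : Int) : List Int :=
  (PySem.List.pyRange (max 0 (PySem.Int.floordiv u w - 1)) (min h (PySem.Int.floordiv u w + 2))).flatMap
    (fun ny => (PySem.List.pyRange (max 0 (PySem.Int.mod u w - 1)) (min w (PySem.Int.mod u w + 2))).map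
      (fun nx => ny*w + nx))

theorem nbrs_subset (w h : Int) (hw : 0 < w) (u j : Int) (hj : j ∈ nbrs w h u) :
    0 ≤ j ∧ j < w*h := by
  simp only [nbrs, List.mem_flatMap, List.mem_map, PySem.List.mem_pyRange_one] at hj
  obtain ⟨ny, ⟨h1, h2⟩, nx, ⟨h3, h4⟩, rfl⟩ := hj
  have b1 : 0 ≤ ny := le_trans (le_max_left _ _) h1
  have b2 : ny < h := lt_of_lt_of_le h2 (min_le_left _ _)
  have b3 : 0 ≤ nx := le_trans (le_max_left _ _) h3
  have b4 : nx < w := lt_of_lt_of_le h4 (min_le_left _ _)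
  constructor
  · positivity
  · have : ny * w + nx < ny*w + w := by omega
    have h5 : ny*w + w = (ny+1)*w := by ring
    have h6 : (ny+1)*w ≤ h*w := by
      apply mul_le_mul_of_nonneg_right (by omega) (by omega)
    have : w*h = h*w := by ring
    omega

theorem fd_bounds (w h u : Int) (hw : 0 < w) (hu0 : 0 ≤ u) (hu1 : u < w*h) :
    0 ≤ PySem.Int.floordiv u w ∧ PySem.Int.floordiv u w < h ∧
    0 ≤ PySem.Int.mod u w ∧ PySem.Int.mod u w < w := by
  have hm0 := PySem.Int.mod_nonneg u hw
  have hm1 := PySem.Int.mod_lt u hw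
  have he := PySem.Int.floordiv_mul_add_mod u w
  set q := PySem.Int.floordiv u w with hq
  refine ⟨?_, ?_, hm0, hm1⟩
  · by_contra hlt
    push_neg at hlt
    have : q ≤ -1 := by omega
    have : q * w ≤ (-1) * w := mul_le_mul_of_nonneg_right this (by omega)
    omega
  · by_contra hlt
    push_neg at hlt
    have : h * w ≤ q * w := mul_le_mul_of_nonneg_right hlt (by omega)
    have : w*h = h*w := by ring
    omega

theorem mem_nbrs (w h : Int) (hw : 0 < w) (hh : 0 < h) (u : Int) (hu0 : 0 ≤ u) (hu1 : u < w*h)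
    (j : Int) :
    j ∈ nbrs w h u ↔ 0 ≤ j ∧ j < w*h ∧
      PySem.Int.floordiv j w ≤ PySem.Int.floordiv u w + 1 ∧
      PySem.Int.floordiv u w ≤ PySem.Int.floordiv j w + 1 ∧
      PySem.Int.mod j w ≤ PySem.Int.mod u w + 1 ∧
      PySem.Int.mod u w ≤ PySem.Int.mod j w + 1 := by
  obtain ⟨hcy0, hcy1, hcx0, hcx1⟩ := fd_bounds w h u hw hu0 hu1
  have heu := PySem.Int.floordiv_mul_add_mod u w
  constructor
  · intro hj
    have hb := nbrs_subset w h hw u j hj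
    simp only [nbrs, List.mem_flatMap, List.mem_map, PySem.List.mem_pyRange_one] at hj
    obtain ⟨ny, ⟨h1, h2⟩, nx, ⟨h3, h4⟩, rfl⟩ := hj
    have b1 : 0 ≤ ny := le_trans (le_max_left _ _) h1
    have b3 : 0 ≤ nx := le_trans (le_max_left _ _) h3
    have b4 : nx < w := lt_of_lt_of_le h4 (min_le_left _ _)
    have hfd : PySem.Int.floordiv (ny*w+nx) w = ny := by
      rw [PySem.Int.floordiv_eq_iff_of_pos hw]
      constructor
      · omega
      · have : (ny+1)*w = ny*w + w := by ring
        omega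
    have hmd : PySem.Int.mod (ny*w+nx) w = nx := by
      have := PySem.Int.floordiv_mul_add_mod (ny*w+nx) w
      rw [hfd] at this
      omega
    rw [hfd, hmd]
    refine ⟨hb.1, hb.2, ?_, ?_, ?_, ?_⟩ <;> omega
  · rintro ⟨hj0, hj1, p1, p2, p3, p4⟩
    obtain ⟨hjy0, hjy1, hjx0, hjx1⟩ := fd_bounds w h j hw hj0 hj1
    have hej := PySem.Int.floordiv_mul_add_mod j w
    simp only [nbrs, List.mem_flatMap, List.mem_map, PySem.List.mem_pyRange_one]
    refine ⟨PySem.Int.floordiv j w, ⟨by omega, by omega⟩, PySem.Int.mod j w, ⟨by omega, by omega⟩, by omega⟩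

def Step (m : List Bool) (w h : Int) (u j : Int) : Prop :=
  j ∈ nbrs w h u ∧ PySem.List.pyGetD m j false = true

def Reach (m : List Bool) (w h : Int) : Int → Int → Prop := Relation.ReflTransGen (Step m w h)

theorem reach_bounds_symm (m : List Bool) (w h : Int) (hw : 0 < w) (hh : 0 < h)
    {x u : Int} (hx0 : 0 ≤ x) (hx1 : x < w*h) (hxm : PySem.List.pyGetD m x false = true)
    (hr : Reach m w h x u) :
    (0 ≤ u ∧ u < w*h ∧ PySem.List.pyGetD m u false = true) ∧ Reach m w h u x := by
  induction hr with
  | refl => exact ⟨⟨hx0, hx1, hxm⟩, Relation.ReflTransGen.refl⟩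
  | @tail b c hab hbc ih =>
    obtain ⟨⟨hb0, hb1, hbm⟩, hback⟩ := ih
    obtain ⟨hmem, hcm⟩ := hbc
    have hc := nbrs_subset w h hw _ _ hmem
    refine ⟨⟨hc.1, hc.2, hcm⟩, ?_⟩
    have hsym : b ∈ nbrs w h c := by
      rw [mem_nbrs w h hw hh c hc.1 hc.2]
      rw [mem_nbrs w h hw hh b hb0 hb1] at hmem
      refine ⟨hb0, hb1, ?_, ?_, ?_, ?_⟩ <;> omega
    exact Relation.ReflTransGen.head ⟨hsym, hbm⟩ hback

theorem closed_reach (m : List Bool) (w h : Int) (P : Int → Prop) (ex : List Int)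
    (hcl : ∀ u, P u → u ∉ ex → ∀ j ∈ nbrs w h u, PySem.List.pyGetD m j false = true → P j)
    {x u : Int} (hx : P x) (hr : Reach m w h x u) :
    P u ∨ ∃ s ∈ ex, P s ∧ Reach m w h s u := by
  induction hr using Relation.ReflTransGen.head_induction_on with
  | refl => exact Or.inl hx
  | head h' hrest ih =>
    rename_i a c
    by_cases hmem : a ∈ ex
    · exact Or.inr ⟨a, hmem, hx, Relation.ReflTransGen.head h' hrest⟩
    · exact ih (hcl a hx hmem _ h'.1 h'.2)

theorem vget_set (V : List Bool) (j : Int) (hj0 : 0 ≤ j) (hj1 : j < (V.length : Int)) (v : Bool)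
    (u : Int) (hu0 : 0 ≤ u) :
    PySem.List.pyGetD (PySem.List.pySetD V j v) u false =
      if u = j then v else PySem.List.pyGetD V u false := by
  rw [PySem.List.pySetD_of_nonneg V v hj0, PySem.List.pyGetD_of_nonneg _ _ hu0,
      PySem.List.pyGetD_of_nonneg _ _ hu0]
  have hjl : j.toNat < V.length := by omega
  by_cases he : u = j
  · subst he
    simp [List.getD, List.getElem?_set, hjl]
  · have hne : j.toNat ≠ u.toNat := by omega
    simp [List.getD, List.getElem?_set, hne]
    exact fun h => absurd h he

theorem count_true_set (V : List Bool) (j : Int) (hj0 : 0 ≤ j) (hj1 : j < (V.length : Int))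
    (hf : PySem.List.pyGetD V j false = false) :
    (PySem.List.pySetD V j true).count true = V.count true + 1 := by
  rw [PySem.List.pySetD_of_nonneg V true hj0]
  have hjl : j.toNat < V.length := by omega
  rw [PySem.List.pyGetD_of_nonneg _ _ hj0] at hf
  have hv : V[j.toNat] = false := by
    have h := List.getD_eq_getElem?_getD (l := V) (i := j.toNat) (a := false)
    rw [List.getElem?_eq_getElem hjl] at h
    simp at h
    rw [← h]; exact hf
  rw [List.count_set hjl]
  simp [hv]

theorem aMark_char (m : List Bool) (L : List Int) (V : List Bool) (st : List Int)
    (hL : ∀ j ∈ L, 0 ≤ j ∧ j < (V.length : Int)) :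
    let r := L.foldl (fun (s : List Bool × List Int) j =>
      if !(PySem.List.pyGetD s.1 j false) && PySem.List.pyGetD m j false then
        (PySem.List.pySetD s.1 j true, s.2 ++ [j]) else s) (V, st)
    r.1.length = V.length ∧
    (∀ u, 0 ≤ u → (PySem.List.pyGetD r.1 u false = true ↔
        PySem.List.pyGetD V u false = true ∨ (u ∈ L ∧ PySem.List.pyGetD m u false = true))) ∧
    ∃ new, r.2 = st ++ new ∧ new.Nodup ∧
      (∀ u, u ∈ new ↔ PySem.List.pyGetD V u false = false ∧ u ∈ L ∧ PySem.List.pyGetD m u false = true) ∧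
      r.1.count true = V.count true + new.length := by
  induction L generalizing V st with
  | nil => exact ⟨rfl, fun u _ => by simp, [], by simp, List.nodup_nil, by simp, by simp⟩
  | cons j L ih =>
    obtain ⟨hj0, hj1⟩ := hL j (List.mem_cons_self)
    have hLr : ∀ x ∈ L, 0 ≤ x ∧ x < (V.length : Int) := fun x hx => hL x (List.mem_cons_of_mem _ hx)
    simp only [List.foldl_cons]
    by_cases hc : PySem.List.pyGetD V j false = false ∧ PySem.List.pyGetD m j false = true
    · have hcond : (!(PySem.List.pyGetD V j false) && PySem.List.pyGetD m j false) = true := by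
        simp [hc.1, hc.2]
      rw [hcond]
      simp only [if_true]
      have hlen1 : (PySem.List.pySetD V j true).length = V.length := PySem.List.length_pySetD V j true
      have hLr1 : ∀ x ∈ L, 0 ≤ x ∧ x < ((PySem.List.pySetD V j true).length : Int) := by
        intro x hx; rw [hlen1]; exact hLr x hx
      obtain ⟨hlen', hchar', new', hr2', hnd', hmemnew', hcount'⟩ :=
        ih (PySem.List.pySetD V j true) (st ++ [j]) hLr1
      have hv1 : ∀ u, 0 ≤ u → PySem.List.pyGetD (PySem.List.pySetD V j true) u false =
          if u = j then true else PySem.List.pyGetD V u false := fun u hu =>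
        vget_set V j hj0 hj1 true u hu
      refine ⟨hlen'.trans hlen1, ?_, j :: new', by rw [hr2']; simp, ?_, ?_, ?_⟩
      · intro u hu
        rw [hchar' u hu, hv1 u hu]
        by_cases he : u = j
        · subst he
          simp [hc.2]
        · simp only [if_neg he]
          constructor
          · rintro (hx | ⟨hm, hk⟩)
            · exact Or.inl hx
            · exact Or.inr ⟨List.mem_cons_of_mem _ hm, hk⟩
          · rintro (hx | ⟨hm, hk⟩)
            · exact Or.inl hx
            · rcases List.mem_cons.1 hm with rfl | hm'
              · exact absurd rfl he
              · exact Or.inr ⟨hm', hk⟩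
      · refine List.nodup_cons.2 ⟨fun hjn => ?_, hnd'⟩
        have := (hmemnew' j).1 hjn
        rw [hv1 j hj0] at this
        simp at this
      · intro u
        simp only [List.mem_cons]
        constructor
        · rintro (rfl | hun)
          · exact ⟨hc.1, Or.inl rfl, hc.2⟩
          · obtain ⟨ha, hb, hk⟩ := (hmemnew' u).1 hun
            have hu0 : 0 ≤ u := (hLr u hb).1
            rw [hv1 u hu0] at ha
            by_cases he : u = j
            · subst he; simp at ha
            · rw [if_neg he] at ha
              exact ⟨ha, Or.inr hb, hk⟩
        · rintro ⟨ha, rfl | hb, hk⟩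
          · exact Or.inl rfl
          · by_cases he : u = j
            · exact Or.inl he
            · refine Or.inr ((hmemnew' u).2 ⟨?_, hb, hk⟩)
              have hu0 : 0 ≤ u := (hLr u hb).1
              rw [hv1 u hu0, if_neg he]
              exact ha
      · rw [hcount', count_true_set V j hj0 hj1 hc.1]
        simp
        omega
    · have hcond : (!(PySem.List.pyGetD V j false) && PySem.List.pyGetD m j false) = false := by
        rcases Bool.eq_false_or_eq_true (PySem.List.pyGetD V j false) with h1 | h1
        · simp [h1]
        · rcases Bool.eq_false_or_eq_true (PySem.List.pyGetD m j false) with h2 | h2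
          · exact absurd ⟨h1, h2⟩ hc
          · simp [h2]
      rw [hcond]
      simp only [Bool.false_eq_true, if_false]
      obtain ⟨hlen, hchar, new, hr2, hnd, hmemnew, hcount⟩ := ih V st hLr
      refine ⟨hlen, ?_, new, hr2, hnd, ?_, hcount⟩
      · intro u hu
        rw [hchar u hu]
        constructor
        · rintro (h | ⟨hm, hmk⟩)
          · exact Or.inl h
          · exact Or.inr ⟨List.mem_cons_of_mem _ hm, hmk⟩
        · rintro (h | ⟨hm, hmk⟩)
          · exact Or.inl h
          · rcases List.mem_cons.1 hm with rfl | hm'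
            · rcases Bool.eq_false_or_eq_true (PySem.List.pyGetD V u false) with h1 | h1
              · exact Or.inl h1
              · exact absurd ⟨h1, hmk⟩ hc
            · exact Or.inr ⟨hm', hmk⟩
      · intro u
        rw [hmemnew u]
        constructor
        · rintro ⟨ha, hb, hk⟩ ; exact ⟨ha, List.mem_cons_of_mem _ hb, hk⟩
        · rintro ⟨ha, hb, hk⟩
          rcases List.mem_cons.1 hb with rfl | hb'
          · exact absurd ⟨ha, hk⟩ hc
          · exact ⟨ha, hb', hk⟩

structure AInv (m : List Bool) (w h : Int) (V : List Bool) (st : List Int) : Prop where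
  len : V.length = (w*h).toNat
  stMem : ∀ s ∈ st, 0 ≤ s ∧ s < w*h ∧ PySem.List.pyGetD m s false = true ∧ PySem.List.pyGetD V s false = true
  masked : ∀ u, 0 ≤ u → u < w*h → PySem.List.pyGetD V u false = true → PySem.List.pyGetD m u false = true
  closed : ∀ u, 0 ≤ u → u < w*h → PySem.List.pyGetD V u false = true → u ∉ st →
      ∀ j ∈ nbrs w h u, PySem.List.pyGetD m j false = true → PySem.List.pyGetD V j false = true
  nodup : st.Nodup

theorem vget_true_of_full (V : List Bool) (hc : V.count true = V.length) (j : Int)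
    (hj0 : 0 ≤ j) (hj1 : j < (V.length : Int)) : PySem.List.pyGetD V j false = true := by
  rw [PySem.List.pyGetD_eq_getElem V false hj0 (by omega)]
  exact ((List.count_eq_length.1 hc) V[j.toNat] (List.getElem_mem _)).symm

theorem fill_char (m : List Bool) (w h : Int) (hw : 0 < w) (hh : 0 < h)
    (fuel : Nat) (V : List Bool) (st : List Int) (a : Int)
    (inv : AInv m w h V st)
    (hfuel : V.length - V.count true + st.length ≤ fuel) :
    AInv m w h (aWhile m w h fuel V st a).1 [] ∧
    (∀ u, 0 ≤ u → u < w*h →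
      (PySem.List.pyGetD (aWhile m w h fuel V st a).1 u false = true ↔
        (PySem.List.pyGetD V u false = true ∨ ∃ s ∈ st, Reach m w h s u))) ∧
    (aWhile m w h fuel V st a).2 = a + ((aWhile m w h fuel V st a).1.count true : Int) - (V.count true : Int) + st.length := by
  have hcle := List.count_le_length (l := V) (a := true)
  induction fuel generalizing V st a with
  | zero =>
    have hst : st = [] := List.length_eq_zero_iff.1 (by omega)
    subst hst
    have hfull : V.count true = V.length := by omega
    refine ⟨⟨inv.len, by simp, inv.masked, ?_, List.nodup_nil⟩, ?_, by simp [aWhile]⟩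
    · intro u hu0 hu1 hv _ j hj hmj
      obtain ⟨hj0, hj1⟩ := nbrs_subset w h hw u j hj
      exact vget_true_of_full V hfull j hj0 (by rw [inv.len]; omega)
    · intro u hu0 hu1
      simp [aWhile]
  | succ fuel ih =>
    rcases List.eq_nil_or_concat st with rfl | ⟨st', cur, rfl⟩
    · refine ⟨⟨inv.len, by simp, inv.masked, ?_, List.nodup_nil⟩, ?_, ?_⟩
      · intro u hu0 hu1 hv _
        exact inv.closed u hu0 hu1 hv (by simp)
      · intro u hu0 hu1
        simp [aWhile, PySem.List.pop?]
      · simp [aWhile, PySem.List.pop?]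
    · simp only [List.concat_eq_append] at inv ⊢
      obtain ⟨hc0, hc1, hcm, hcv⟩ := inv.stMem cur (by simp)
      have hlen : (V.length : Int) = w*h := by rw [inv.len]; omega
      have hL : ∀ j ∈ nbrs w h cur, 0 ≤ j ∧ j < (V.length : Int) := by
        intro j hj
        obtain ⟨h1, h2⟩ := nbrs_subset w h hw cur j hj
        omega
      obtain ⟨hlen1, hchar1, new, hr2, hnd, hmemnew, hcount⟩ := aMark_char m (nbrs w h cur) V st' hL
      set body := fun (s : List Bool × List Int) (j : Int) =>
        if !(PySem.List.pyGetD s.1 j false) && PySem.List.pyGetD m j false then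
          (PySem.List.pySetD s.1 j true, s.2 ++ [j]) else s with hbody
      have hfold : (PySem.List.pyRange (max 0 (PySem.Int.floordiv cur w - 1)) (min h (PySem.Int.floordiv cur w + 2))).foldl
          (fun (s : List Bool × List Int) ny =>
            (PySem.List.pyRange (max 0 (PySem.Int.mod cur w - 1)) (min w (PySem.Int.mod cur w + 2))).foldl
              (fun s nx => body s (ny*w + nx)) s) (V, st')
          = (nbrs w h cur).foldl body (V, st') := by
        rw [nbrs, List.foldl_flatMap]
        simp only [List.foldl_map]
      have hstep : aWhile m w h (fuel+1) V (st' ++ [cur]) a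
          = aWhile m w h fuel ((nbrs w h cur).foldl body (V, st')).1 ((nbrs w h cur).foldl body (V, st')).2 (a+1) := by
        conv_lhs => rw [aWhile]
        rw [PySem.List.pop?_last]
        rw [← hfold]
      have hnodup' : st'.Nodup ∧ cur ∉ st' := by
        have h := inv.nodup
        rw [List.nodup_append] at h
        exact ⟨h.1, fun hmem => h.2.2 cur hmem cur (List.mem_singleton_self cur) rfl⟩
      have hstMem' : ∀ s ∈ st', 0 ≤ s ∧ s < w*h ∧ PySem.List.pyGetD m s false = true ∧ PySem.List.pyGetD V s false = true :=
        fun s hs => inv.stMem s (by simp [hs])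
      have hr1 : ∀ u, 0 ≤ u → u < w*h →
          (PySem.List.pyGetD ((nbrs w h cur).foldl body (V, st')).1 u false = true ↔
            PySem.List.pyGetD V u false = true ∨ (u ∈ nbrs w h cur ∧ PySem.List.pyGetD m u false = true)) :=
        fun u hu0 _ => hchar1 u hu0
      have hinv1 : AInv m w h ((nbrs w h cur).foldl body (V, st')).1 (st' ++ new) := by
        refine ⟨hlen1.trans inv.len, ?_, ?_, ?_, ?_⟩
        · intro s hs
          rcases List.mem_append.1 hs with hs' | hsn
          · obtain ⟨b0, b1, bm, bv⟩ := hstMem' s hs'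
            exact ⟨b0, b1, bm, (hr1 s b0 b1).2 (Or.inl bv)⟩
          · obtain ⟨ha, hb, hk⟩ := (hmemnew s).1 hsn
            obtain ⟨b0, b1⟩ := nbrs_subset w h hw cur s hb
            exact ⟨b0, b1, hk, (hr1 s b0 b1).2 (Or.inr ⟨hb, hk⟩)⟩
        · intro u hu0 hu1 hv
          rcases (hr1 u hu0 hu1).1 hv with h' | ⟨_, hk⟩
          · exact inv.masked u hu0 hu1 h'
          · exact hk
        · intro u hu0 hu1 hv hnmem j hj hmj
          obtain ⟨hj0, hj1⟩ := nbrs_subset w h hw u j hj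
          by_cases hVu : PySem.List.pyGetD V u false = true
          · by_cases hucur : u = cur
            · subst hucur
              exact (hr1 j hj0 hj1).2 (Or.inr ⟨hj, hmj⟩)
            · have hunotst : u ∉ st' ++ [cur] := by
                simp only [List.mem_append, List.mem_singleton]
                rintro (h' | rfl)
                · exact hnmem (List.mem_append.2 (Or.inl h'))
                · exact hucur rfl
              exact (hr1 j hj0 hj1).2 (Or.inl (inv.closed u hu0 hu1 hVu hunotst j hj hmj))
          · rcases (hr1 u hu0 hu1).1 hv with h' | ⟨hb, hk⟩
            · exact absurd h' hVu
            · have hun : u ∈ new := (hmemnew u).2 ⟨Bool.not_eq_true _ ▸ hVu, hb, hk⟩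
              exact absurd (List.mem_append.2 (Or.inr hun)) hnmem
        · rw [List.nodup_append]
          refine ⟨hnodup'.1, hnd, ?_⟩
          intro x hx1 y hy2 heq
          subst heq
          obtain ⟨hxf, _, _⟩ := (hmemnew x).1 hy2
          obtain ⟨_, _, _, hxv⟩ := hstMem' x hx1
          simp [hxv] at hxf
      have hfuel1 : ((nbrs w h cur).foldl body (V, st')).1.length - ((nbrs w h cur).foldl body (V, st')).1.count true + (st' ++ new).length ≤ fuel := by
        have h1 := List.count_le_length (l := ((nbrs w h cur).foldl body (V, st')).1) (a := true)
        simp only [List.length_append, List.length_cons] at hfuel ⊢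
        rw [hcount, hlen1]
        simp at hfuel
        omega
      obtain ⟨ihInv, ihChar, ihArea⟩ := ih ((nbrs w h cur).foldl body (V, st')).1 ((nbrs w h cur).foldl body (V, st')).2 (a+1) (hr2 ▸ hinv1) (by rw [hr2]; exact hfuel1) (List.count_le_length)
      rw [hstep]
      refine ⟨ihInv, ?_, ?_⟩
      · intro u hu0 hu1
        rw [ihChar u hu0 hu1, hr2]
        constructor
        · rintro (hru | ⟨s, hs, hreach⟩)
          · rcases (hr1 u hu0 hu1).1 hru with h' | ⟨hmem', hk⟩
            · exact Or.inl h'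
            · exact Or.inr ⟨cur, by simp, Relation.ReflTransGen.single ⟨hmem', hk⟩⟩
          · rcases List.mem_append.1 hs with hs' | hsn
            · exact Or.inr ⟨s, by simp [hs'], hreach⟩
            · obtain ⟨_, hb, hk⟩ := (hmemnew s).1 hsn
              exact Or.inr ⟨cur, by simp, Relation.ReflTransGen.trans (Relation.ReflTransGen.single ⟨hb, hk⟩) hreach⟩
        · rintro (hVu | ⟨s, hs, hreach⟩)
          · exact Or.inl ((hr1 u hu0 hu1).2 (Or.inl hVu))
          · rcases List.mem_append.1 hs with hs' | hscur
            · exact Or.inr ⟨s, List.mem_append.2 (Or.inl hs'), hreach⟩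
            · rw [List.mem_singleton] at hscur
              rw [hscur] at hreach
              have hcr := closed_reach m w h
                (fun v => (0 ≤ v ∧ v < w*h) ∧ PySem.List.pyGetD ((nbrs w h cur).foldl body (V, st')).1 v false = true)
                (st' ++ new) ?_ ⟨⟨hc0, hc1⟩, (hr1 cur hc0 hc1).2 (Or.inl hcv)⟩ hreach
              · rcases hcr with ⟨_, hP⟩ | ⟨t, ht, ⟨_, hPt⟩, hrt⟩
                · exact Or.inl hP
                · exact Or.inr ⟨t, ht, hrt⟩
              · intro v ⟨⟨hv0, hv1⟩, hPv⟩ hvex j hj hmj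
                obtain ⟨hj0, hj1⟩ := nbrs_subset w h hw v j hj
                exact ⟨⟨hj0, hj1⟩, hinv1.closed v hv0 hv1 hPv hvex j hj hmj⟩
      · rw [ihArea, hr2, hcount]
        simp only [List.length_append, List.length_cons, List.length_nil]
        push_cast
        ring

-- characterisation of B's neighbour scan for one frontier pixel, then for a whole frontier
theorem bMark_char (m : List Bool) (L : List Int) (comp : PySem.Set Int) (acc : List Int) :
    let r := L.foldl (fun (s : PySem.Set Int × List Int) j =>
      if PySem.List.pyGetD m j false && !(PySem.Set.contains s.1 j) then
        (PySem.Set.add s.1 j, s.2 ++ [j]) else s) (comp, acc)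
    ∃ new, r.2 = acc ++ new ∧ r.1 = comp ++ new ∧ new.Nodup ∧
      (∀ u, u ∈ new ↔ u ∉ comp ∧ u ∈ L ∧ PySem.List.pyGetD m u false = true) := by
  induction L generalizing comp acc with
  | nil => exact ⟨[], by simp, by simp, List.nodup_nil, by simp⟩
  | cons j L ih =>
    simp only [List.foldl_cons]
    by_cases hc : PySem.List.pyGetD m j false = true ∧ j ∉ comp
    · have hnc : PySem.Set.contains comp j = false := by
        rcases Bool.eq_false_or_eq_true (PySem.Set.contains comp j) with h1 | h1
        · exact absurd ((PySem.Set.contains_iff comp j).1 h1) hc.2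
        · exact h1
      have hcond : (PySem.List.pyGetD m j false && !(PySem.Set.contains comp j)) = true := by
        rw [hc.1, hnc]
        rfl
      rw [hcond]
      simp only [if_true]
      have hadd : PySem.Set.add comp j = comp ++ [j] := PySem.Set.add_of_not_mem hc.2
      rw [hadd]
      obtain ⟨new', h2, h1, hnd, hmem⟩ := ih (comp ++ [j]) (acc ++ [j])
      refine ⟨j :: new', by rw [h2]; simp, by rw [h1]; simp, ?_, ?_⟩
      · refine List.nodup_cons.2 ⟨fun hj => ?_, hnd⟩
        have := ((hmem j).1 hj).1
        simp at this
      · intro u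
        simp only [List.mem_cons]
        constructor
        · rintro (rfl | hu)
          · exact ⟨hc.2, Or.inl rfl, hc.1⟩
          · obtain ⟨ha, hb, hk⟩ := (hmem u).1 hu
            exact ⟨fun hx => ha (List.mem_append.2 (Or.inl hx)), Or.inr hb, hk⟩
        · rintro ⟨ha, rfl | hb, hk⟩
          · exact Or.inl rfl
          · by_cases he : u = j
            · exact Or.inl he
            · refine Or.inr ((hmem u).2 ⟨?_, hb, hk⟩)
              simp only [List.mem_append, List.mem_singleton]
              rintro (h' | rfl)
              · exact ha h'
              · exact he rfl
    · have hcond : (PySem.List.pyGetD m j false && !(PySem.Set.contains comp j)) = false := by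
        rcases Bool.eq_false_or_eq_true (PySem.List.pyGetD m j false) with h1 | h1
        · by_cases h2 : j ∈ comp
          · have h3 : PySem.Set.contains comp j = true := (PySem.Set.contains_iff comp j).2 h2
            rw [h3]
            simp
          · exact absurd ⟨h1, h2⟩ hc
        · simp [h1]
      rw [hcond]
      simp only [Bool.false_eq_true, if_false]
      obtain ⟨new', h2, h1, hnd, hmem⟩ := ih comp acc
      refine ⟨new', h2, h1, hnd, ?_⟩
      intro u
      rw [hmem u]
      constructor
      · rintro ⟨ha, hb, hk⟩ ; exact ⟨ha, List.mem_cons_of_mem _ hb, hk⟩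
      · rintro ⟨ha, hb, hk⟩
        rcases List.mem_cons.1 hb with rfl | hb'
        · exact absurd ⟨hk, ha⟩ hc
        · exact ⟨ha, hb', hk⟩

theorem bFr_char (m : List Bool) (w h : Int) (fr : List Int) (comp : PySem.Set Int) (acc : List Int) :
    let r := fr.foldl (fun (s : PySem.Set Int × List Int) cur =>
      (nbrs w h cur).foldl (fun (s : PySem.Set Int × List Int) j =>
        if PySem.List.pyGetD m j false && !(PySem.Set.contains s.1 j) then
          (PySem.Set.add s.1 j, s.2 ++ [j]) else s) s) (comp, acc)
    ∃ new, r.2 = acc ++ new ∧ r.1 = comp ++ new ∧ new.Nodup ∧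
      (∀ u, u ∈ new ↔ u ∉ comp ∧ (∃ c ∈ fr, u ∈ nbrs w h c) ∧ PySem.List.pyGetD m u false = true) := by
  induction fr generalizing comp acc with
  | nil => exact ⟨[], by simp, by simp, List.nodup_nil, by simp⟩
  | cons cur fr ih =>
    simp only [List.foldl_cons]
    obtain ⟨new1, h2a, h1a, hnd1, hmem1⟩ := bMark_char m (nbrs w h cur) comp acc
    have hpair : (nbrs w h cur).foldl (fun (s : PySem.Set Int × List Int) j =>
        if PySem.List.pyGetD m j false && !(PySem.Set.contains s.1 j) then
          (PySem.Set.add s.1 j, s.2 ++ [j]) else s) (comp, acc) = (comp ++ new1, acc ++ new1) := by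
      exact Prod.ext h1a h2a
    rw [hpair]
    obtain ⟨new2, h2b, h1b, hnd2, hmem2⟩ := ih (comp ++ new1) (acc ++ new1)
    refine ⟨new1 ++ new2, by rw [h2b]; simp, by rw [h1b]; simp, ?_, ?_⟩
    · rw [List.nodup_append]
      refine ⟨hnd1, hnd2, ?_⟩
      intro x hx1 y hy2 heq
      subst heq
      exact ((hmem2 x).1 hy2).1 (List.mem_append.2 (Or.inr hx1))
    · intro u
      simp only [List.mem_append]
      constructor
      · rintro (hu | hu)
        · obtain ⟨ha, hb, hk⟩ := (hmem1 u).1 hu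
          exact ⟨ha, ⟨cur, List.mem_cons_self, hb⟩, hk⟩
        · obtain ⟨ha, ⟨c, hcfr, hcm⟩, hk⟩ := (hmem2 u).1 hu
          exact ⟨fun hx => ha (List.mem_append.2 (Or.inl hx)), ⟨c, List.mem_cons_of_mem _ hcfr, hcm⟩, hk⟩
      · rintro ⟨ha, ⟨c, hcfr, hcm⟩, hk⟩
        by_cases hu1 : u ∈ new1
        · exact Or.inl hu1
        · rcases List.mem_cons.1 hcfr with rfl | hcfr'
          · exact Or.inl ((hmem1 u).2 ⟨ha, hcm, hk⟩)
          · refine Or.inr ((hmem2 u).2 ⟨?_, ⟨c, hcfr', hcm⟩, hk⟩)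
            simp only [List.mem_append]
            rintro (h' | h')
            · exact ha h'
            · exact hu1 h'

theorem nodup_length_le (l : List Int) (N : Int) (hnd : l.Nodup) (hb : ∀ x ∈ l, 0 ≤ x ∧ x < N) :
    l.length ≤ N.toNat := by
  classical
  rw [← List.toFinset_card_of_nodup hnd]
  have hsub : l.toFinset ⊆ Finset.Icc 0 (N-1) := by
    intro x hx
    rw [List.mem_toFinset] at hx
    obtain ⟨h1, h2⟩ := hb x hx
    rw [Finset.mem_Icc]
    omega
  have := Finset.card_le_card hsub
  rw [Int.card_Icc] at this
  omega

structure BInv (m : List Bool) (w h : Int) (start : Int) (comp : PySem.Set Int) (fr : List Int) : Prop where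
  nodup : comp.Nodup
  mem : ∀ c ∈ comp, 0 ≤ c ∧ c < w*h ∧ PySem.List.pyGetD m c false = true ∧ Reach m w h start c
  frSub : ∀ c ∈ fr, c ∈ comp
  closed : ∀ c ∈ comp, c ∉ fr →
      ∀ j ∈ nbrs w h c, PySem.List.pyGetD m j false = true → j ∈ comp

theorem bFold_eq (m : List Bool) (w h : Int) (fr : List Int) (s0 : PySem.Set Int × List Int) :
    fr.foldl (fun (s : PySem.Set Int × List Int) cur =>
      let cx := PySem.Int.mod cur w
      let cy := PySem.Int.floordiv cur w
      (PySem.List.pyRange (max 0 (cy-1)) (min h (cy+2))).foldl (fun (s : PySem.Set Int × List Int) ny =>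
        (PySem.List.pyRange (max 0 (cx-1)) (min w (cx+2))).foldl (fun (s : PySem.Set Int × List Int) nx =>
          let j := ny*w + nx
          if PySem.List.pyGetD m j false && !(PySem.Set.contains s.1 j) then
            (PySem.Set.add s.1 j, s.2 ++ [j])
          else s) s) s) s0
    = fr.foldl (fun (s : PySem.Set Int × List Int) cur =>
      (nbrs w h cur).foldl (fun (s : PySem.Set Int × List Int) j =>
        if PySem.List.pyGetD m j false && !(PySem.Set.contains s.1 j) then
          (PySem.Set.add s.1 j, s.2 ++ [j]) else s) s) s0 := by
  have hfn : (fun (s : PySem.Set Int × List Int) cur =>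
      let cx := PySem.Int.mod cur w
      let cy := PySem.Int.floordiv cur w
      (PySem.List.pyRange (max 0 (cy-1)) (min h (cy+2))).foldl (fun (s : PySem.Set Int × List Int) ny =>
        (PySem.List.pyRange (max 0 (cx-1)) (min w (cx+2))).foldl (fun (s : PySem.Set Int × List Int) nx =>
          let j := ny*w + nx
          if PySem.List.pyGetD m j false && !(PySem.Set.contains s.1 j) then
            (PySem.Set.add s.1 j, s.2 ++ [j])
          else s) s) s)
      = (fun (s : PySem.Set Int × List Int) cur =>
      (nbrs w h cur).foldl (fun (s : PySem.Set Int × List Int) j =>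
        if PySem.List.pyGetD m j false && !(PySem.Set.contains s.1 j) then
          (PySem.Set.add s.1 j, s.2 ++ [j]) else s) s) := by
    funext s cur
    rw [nbrs, List.foldl_flatMap]
    simp only [List.foldl_map]
  rw [hfn]

theorem bfs_char (m : List Bool) (w h : Int) (hw : 0 < w) (hh : 0 < h) (start : Int)
    (fuel : Nat) (comp : PySem.Set Int) (fr : List Int)
    (inv : BInv m w h start comp fr)
    (hfuel : (w*h).toNat + 2 ≤ fuel + comp.length) :
    (bWhile m w h fuel comp fr).Nodup ∧
    (∀ c ∈ bWhile m w h fuel comp fr, 0 ≤ c ∧ c < w*h ∧ PySem.List.pyGetD m c false = true ∧ Reach m w h start c) ∧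
    (∀ u, u ∈ bWhile m w h fuel comp fr ↔ (u ∈ comp ∨ ∃ s ∈ fr, Reach m w h s u)) := by
  have hcb : comp.length ≤ (w*h).toNat :=
    nodup_length_le comp (w*h) inv.nodup (fun x hx => ⟨(inv.mem x hx).1, (inv.mem x hx).2.1⟩)
  induction fuel generalizing comp fr with
  | zero =>
    exact absurd hfuel (by omega)
  | succ fuel ih =>
    by_cases hfr : fr = []
    · subst hfr
      rw [bWhile]
      simp only [List.isEmpty_nil, if_true]
      exact ⟨inv.nodup, inv.mem, fun u => by simp⟩
    · rw [bWhile]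
      have hie : fr.isEmpty = false := by simp [hfr]
      rw [hie]
      simp only [Bool.false_eq_true, if_false]
      rw [bFold_eq]
      obtain ⟨new, h2, h1, hndnew, hmemnew⟩ := bFr_char m w h fr comp []
      simp only [List.nil_append] at h2
      have hpair : fr.foldl (fun (s : PySem.Set Int × List Int) cur =>
          (nbrs w h cur).foldl (fun (s : PySem.Set Int × List Int) j =>
            if PySem.List.pyGetD m j false && !(PySem.Set.contains s.1 j) then
              (PySem.Set.add s.1 j, s.2 ++ [j]) else s) s) (comp, ([] : List Int)) = (comp ++ new, new) :=
        Prod.ext h1 h2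
      rw [hpair]
      have hclosed' : ∀ c ∈ comp ++ new, c ∉ new →
          ∀ j ∈ nbrs w h c, PySem.List.pyGetD m j false = true → j ∈ comp ++ new := by
        intro c hcmem hcnew j hj hmj
        have hcc : c ∈ comp := by
          rcases List.mem_append.1 hcmem with h' | h'
          · exact h'
          · exact absurd h' hcnew
        by_cases hjc : j ∈ comp
        · exact List.mem_append.2 (Or.inl hjc)
        · by_cases hcfr : c ∈ fr
          · exact List.mem_append.2 (Or.inr ((hmemnew j).2 ⟨hjc, ⟨c, hcfr, hj⟩, hmj⟩))
          · exact List.mem_append.2 (Or.inl (inv.closed c hcc hcfr j hj hmj))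
      by_cases hnew : new = []
      · subst hnew
        simp only [List.append_nil] at hpair hclosed' ⊢
        cases fuel with
        | zero => exact absurd hfuel (by omega)
        | succ f =>
          rw [bWhile]
          simp only [List.isEmpty_nil, if_true]
          refine ⟨inv.nodup, inv.mem, ?_⟩
          intro u
          constructor
          · exact fun hu => Or.inl hu
          · rintro (hu | ⟨s', hs', hr⟩)
            · exact hu
            · have hcr := closed_reach m w h (fun v => v ∈ comp) [] ?_ (inv.frSub s' hs') hr
              · rcases hcr with h' | ⟨t, ht, _⟩
                · exact h'
                · exact absurd ht (List.not_mem_nil)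
              · intro v hv _ j hj hmj
                exact hclosed' v hv (List.not_mem_nil) j hj hmj
      · have hinv' : BInv m w h start (comp ++ new) new := by
          refine ⟨?_, ?_, fun c hc => List.mem_append.2 (Or.inr hc), hclosed'⟩
          · rw [List.nodup_append]
            exact ⟨inv.nodup, hndnew, fun x hx y hy heq => ((hmemnew y).1 hy).1 (heq ▸ hx)⟩
          · intro c hc
            rcases List.mem_append.1 hc with h' | h'
            · exact inv.mem c h'
            · obtain ⟨hnc, ⟨c', hcfr, hcm⟩, hk⟩ := (hmemnew c).1 h'
              obtain ⟨b0, b1⟩ := nbrs_subset w h hw c' c hcm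
              obtain ⟨_, _, _, hrc'⟩ := inv.mem c' (inv.frSub c' hcfr)
              exact ⟨b0, b1, hk, Relation.ReflTransGen.tail hrc' ⟨hcm, hk⟩⟩
        have hcb' : (comp ++ new).length ≤ (w*h).toNat :=
          nodup_length_le _ (w*h) hinv'.nodup (fun x hx => ⟨(hinv'.mem x hx).1, (hinv'.mem x hx).2.1⟩)
        have hnewpos : 1 ≤ new.length := by
          cases new with
          | nil => exact absurd rfl hnew
          | cons a l => simp
        obtain ⟨ihnd, ihmem, ihchar⟩ := ih (comp ++ new) new hinv'
          (by simp only [List.length_append]; omega) hcb'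
        refine ⟨ihnd, ihmem, ?_⟩
        intro u
        rw [ihchar u]
        constructor
        · rintro (hu | ⟨s', hs', hr⟩)
          · rcases List.mem_append.1 hu with h' | h'
            · exact Or.inl h'
            · obtain ⟨_, ⟨c', hcfr, hcm⟩, hk⟩ := (hmemnew u).1 h'
              exact Or.inr ⟨c', hcfr, Relation.ReflTransGen.single ⟨hcm, hk⟩⟩
          · obtain ⟨_, ⟨c', hcfr, hcm⟩, hk⟩ := (hmemnew s').1 hs'
            exact Or.inr ⟨c', hcfr, Relation.ReflTransGen.trans (Relation.ReflTransGen.single ⟨hcm, hk⟩) hr⟩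
        · rintro (hu | ⟨s', hs', hr⟩)
          · exact Or.inl (List.mem_append.2 (Or.inl hu))
          · have hcr := closed_reach m w h (fun v => v ∈ comp ++ new) new ?_
              (List.mem_append.2 (Or.inl (inv.frSub s' hs'))) hr
            · rcases hcr with h' | ⟨t, ht, _, hrt⟩
              · exact Or.inl h'
              · exact Or.inr ⟨t, ht, hrt⟩
            · intro v hv hvex j hj hmj
              exact hclosed' v hv hvex j hj hmj

theorem count_of_char (comp : List Int) (V' V : List Bool)
    (hlen : V'.length = V.length)
    (hchar : ∀ u, 0 ≤ u → u < (V.length : Int) →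
      (PySem.List.pyGetD V' u false = true ↔ PySem.List.pyGetD V u false = true ∨ u ∈ comp))
    (hnd : comp.Nodup)
    (hsub : ∀ u ∈ comp, 0 ≤ u ∧ u < (V.length : Int))
    (hdisj : ∀ u ∈ comp, PySem.List.pyGetD V u false = false) :
    V'.count true = V.count true + comp.length := by
  induction comp generalizing V with
  | nil =>
    have hVV : V' = V := by
      apply List.ext_getElem hlen
      intro k h1 h2
      have hc := hchar (k : Int) (by omega) (by exact_mod_cast h2)
      simp only [List.not_mem_nil, and_false, or_false] at hc
      rw [PySem.List.pyGetD_eq_getElem V' false (by omega) (by simp; omega),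
          PySem.List.pyGetD_eq_getElem V false (by omega) (by simp; omega)] at hc
      simp only [Int.toNat_natCast] at hc
      exact Bool.eq_iff_iff.2 hc
    rw [hVV]; simp
  | cons j rest ih =>
    obtain ⟨hj0, hj1⟩ := hsub j List.mem_cons_self
    have hjf : PySem.List.pyGetD V j false = false := hdisj j List.mem_cons_self
    have hjn : j ∉ rest := (List.nodup_cons.1 hnd).1
    have hlen1 : (PySem.List.pySetD V j true).length = V.length := PySem.List.length_pySetD V j true
    have hvs := vget_set V j hj0 hj1 true
    have := ih (PySem.List.pySetD V j true) (by omega)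
      ?_ (List.nodup_cons.1 hnd).2 ?_ ?_
    · rw [this, count_true_set V j hj0 hj1 hjf]
      simp
      omega
    · intro u hu0 hu1
      rw [hlen1] at hu1
      rw [hchar u hu0 hu1, hvs u hu0]
      by_cases he : u = j
      · subst he
        simp
      · simp only [if_neg he, List.mem_cons]
        constructor
        · rintro (hv | rfl | hm)
          · exact Or.inl hv
          · exact absurd rfl he
          · exact Or.inr hm
        · rintro (hv | hm)
          · exact Or.inl hv
          · exact Or.inr (Or.inr hm)
    · intro u hu
      have := hsub u (List.mem_cons_of_mem _ hu)
      omega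
    · intro u hu
      rw [hvs u (hsub u (List.mem_cons_of_mem _ hu)).1]
      rw [if_neg (fun he => hjn (by rwa [he] at hu))]
      exact hdisj u (List.mem_cons_of_mem _ hu)

theorem foldl_grid_nat {σ : Type} (W H : Nat) (f : σ → Nat → σ) (init : σ) :
    (List.range H).foldl (fun s y => (List.range W).foldl (fun s x => f s (y*W+x)) s) init
      = (List.range (H*W)).foldl f init := by
  induction H generalizing init with
  | zero => simp
  | succ H ih =>
    rw [List.range_succ, List.foldl_append, ih, Nat.succ_mul, List.range_add, List.foldl_append]
    simp only [List.foldl_map, List.foldl_cons, List.foldl_nil]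

theorem foldl_grid {σ : Type} (w h : Int) (hw : 0 ≤ w) (f : σ → Int → σ) (init : σ) :
    (PySem.List.pyRange 0 h).foldl (fun s y => (PySem.List.pyRange 0 w).foldl (fun s x => f s (y*w+x)) s) init
      = (PySem.List.pyRange 0 (w*h)).foldl f init := by
  by_cases hh : h ≤ 0
  · rw [PySem.List.pyRange_one_eq_nil hh, PySem.List.pyRange_one_eq_nil (mul_nonpos_of_nonneg_of_nonpos hw hh)]
    rfl
  · have hh : 0 < h := by omega
    have hwh : (w*h).toNat = h.toNat * w.toNat := by
      rw [mul_comm]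
      exact Int.toNat_mul (by omega) hw
    rw [PySem.List.pyRange_one 0 h, PySem.List.pyRange_one 0 w, PySem.List.pyRange_one 0 (w*h)]
    simp only [List.foldl_map, Int.sub_zero, zero_add, hwh]
    rw [← foldl_grid_nat w.toNat h.toNat (fun s k => f s (k : Int)) init]
    apply PySem.List.foldl_congr_mem
    intro acc ky _
    apply PySem.List.foldl_congr_mem
    intro acc2 kx _
    congr 1
    push_cast [Int.toNat_of_nonneg hw]
    ring

structure ORel (m : List Bool) (w h : Int) (V : List Bool) (seen : PySem.Set Int) : Prop where
  len : V.length = (w*h).toNat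
  agree : ∀ u, 0 ≤ u → u < w*h → (PySem.List.pyGetD V u false = true ↔ u ∈ seen)
  seenMem : ∀ u ∈ seen, 0 ≤ u ∧ u < w*h
  masked : ∀ u, 0 ≤ u → u < w*h → PySem.List.pyGetD V u false = true → PySem.List.pyGetD m u false = true
  closed : ∀ u, 0 ≤ u → u < w*h → PySem.List.pyGetD V u false = true →
      ∀ j ∈ nbrs w h u, PySem.List.pyGetD m j false = true → PySem.List.pyGetD V j false = true

def bodyA (m : List Bool) (w h : Int) : (List Bool × List Int) → Int → (List Bool × List Int) :=
  fun s start =>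
    if PySem.List.pyGetD s.1 start false || !(PySem.List.pyGetD m start false) then s
    else
      let r := aWhile m w h ((w*h).toNat + 1) (PySem.List.pySetD s.1 start true) [start] 0
      (r.1, s.2 ++ [r.2])

def bodyB (m : List Bool) (w h : Int) : (PySem.Set Int × List Int) → Int → (PySem.Set Int × List Int) :=
  fun s start =>
    if PySem.Set.contains s.1 start || !(PySem.List.pyGetD m start false) then s
    else
      let comp := bWhile m w h ((w*h).toNat + 2) (PySem.Set.ofList [start]) [start]
      (PySem.Set.union s.1 comp, s.2 ++ [PySem.Set.len comp])

theorem vget_replicate (n : Nat) (u : Int) (hu : 0 ≤ u) :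
    PySem.List.pyGetD (List.replicate n false) u false = false := by
  rw [PySem.List.pyGetD_of_nonneg _ _ hu]
  rcases Nat.lt_or_ge u.toNat n with h' | h'
  · rw [List.getD_eq_getElem _ _ (by simpa using h')]
    simp
  · rw [List.getD_eq_default _ _ (by simpa using h')]

theorem step_sync (m : List Bool) (w h : Int) (hw : 0 < w) (hh : 0 < h)
    (i : Int) (hi0 : 0 ≤ i) (hi1 : i < w*h)
    (V : List Bool) (seen : PySem.Set Int) (rel : ORel m w h V seen)
    (outA outB : List Int) :
    ∃ V' seen' app, bodyA m w h (V, outA) i = (V', outA ++ app) ∧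
      bodyB m w h (seen, outB) i = (seen', outB ++ app) ∧ ORel m w h V' seen' := by
  have hlenInt : (V.length : Int) = w*h := by
    rw [rel.len]; omega
  have hagree := rel.agree i hi0 hi1
  by_cases hskip : PySem.List.pyGetD V i false = true ∨ PySem.List.pyGetD m i false = false
  · -- both skip
    have hcondA : (PySem.List.pyGetD V i false || !(PySem.List.pyGetD m i false)) = true := by
      rcases hskip with h' | h' <;> simp [h']
    have hcondB : (PySem.Set.contains seen i || !(PySem.List.pyGetD m i false)) = true := by
      rcases hskip with h' | h'
      · rw [(PySem.Set.contains_iff seen i).2 (hagree.1 h')]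
        rfl
      · simp [h']
    refine ⟨V, seen, [], ?_, ?_, rel⟩
    · simp only [bodyA, hcondA, if_true, List.append_nil]
    · simp only [bodyB, hcondB, if_true, List.append_nil]
  · have hVi : PySem.List.pyGetD V i false = false := by
      rcases Bool.eq_false_or_eq_true (PySem.List.pyGetD V i false) with h' | h'
      · exact absurd (Or.inl h') hskip
      · exact h'
    have hmi : PySem.List.pyGetD m i false = true := by
      rcases Bool.eq_false_or_eq_true (PySem.List.pyGetD m i false) with h' | h'
      · exact h'
      · exact absurd (Or.inr h') hskip
    have hnseen : i ∉ seen := fun hmem => absurd (hagree.2 hmem) (by simp [hVi])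
    have hiV : i < (V.length : Int) := by omega
    have hv1 := vget_set V i hi0 hiV true
    have hlen1 : (PySem.List.pySetD V i true).length = V.length := PySem.List.length_pySetD V i true
    have hinv1 : AInv m w h (PySem.List.pySetD V i true) [i] := by
      refine ⟨hlen1.trans rel.len, ?_, ?_, ?_, by simp⟩
      · intro s hs
        rw [List.mem_singleton] at hs
        subst hs
        refine ⟨hi0, hi1, hmi, ?_⟩
        rw [hv1 s hi0, if_pos rfl]
      · intro u hu0 hu1 hvu
        rw [hv1 u hu0] at hvu
        by_cases he : u = i
        · subst he; exact hmi
        · rw [if_neg he] at hvu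
          exact rel.masked u hu0 hu1 hvu
      · intro u hu0 hu1 hvu hnot j hj hmj
        obtain ⟨hj0, hj1⟩ := nbrs_subset w h hw u j hj
        rw [hv1 u hu0] at hvu
        have he : u ≠ i := fun he => hnot (by rw [he]; exact List.mem_singleton_self i)
        rw [if_neg he] at hvu
        rw [hv1 j hj0]
        by_cases hje : j = i
        · rw [if_pos hje]
        · rw [if_neg hje]
          exact rel.closed u hu0 hu1 hvu j hj hmj
    obtain ⟨invF, charF, areaF⟩ := fill_char m w h hw hh ((w*h).toNat + 1)
      (PySem.List.pySetD V i true) [i] 0 hinv1 (by rw [hlen1, rel.len]; simp)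
    have hinvB : BInv m w h i [i] [i] := by
      refine ⟨by simp, ?_, fun c hc => hc, fun c hc hc' => absurd hc hc'⟩
      intro c hc
      rw [List.mem_singleton] at hc
      subst hc
      exact ⟨hi0, hi1, hmi, Relation.ReflTransGen.refl⟩
    obtain ⟨ndC, memC, charC⟩ := bfs_char m w h hw hh i ((w*h).toNat + 2) [i] [i] hinvB (by simp)
    have hCchar : ∀ u, u ∈ bWhile m w h ((w*h).toNat + 2) [i] [i] ↔ Reach m w h i u := by
      intro u
      rw [charC u]
      constructor
      · rintro (hu | ⟨s, hs, hr⟩)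
        · rw [List.mem_singleton] at hu
          subst hu
          exact Relation.ReflTransGen.refl
        · rw [List.mem_singleton] at hs
          subst hs
          exact hr
      · intro hr
        exact Or.inr ⟨i, List.mem_singleton_self i, hr⟩
    have hdisjC : ∀ u ∈ bWhile m w h ((w*h).toNat + 2) [i] [i], PySem.List.pyGetD V u false = false := by
      intro u hu
      have hr := (hCchar u).1 hu
      obtain ⟨⟨hu0, hu1, hum⟩, hback⟩ := reach_bounds_symm m w h hw hh hi0 hi1 hmi hr
      rcases Bool.eq_false_or_eq_true (PySem.List.pyGetD V u false) with hvu | hvu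
      · have hcr := closed_reach m w h (fun v => (0 ≤ v ∧ v < w*h) ∧ PySem.List.pyGetD V v false = true)
          [] ?_ ⟨⟨hu0, hu1⟩, hvu⟩ hback
        · rcases hcr with ⟨_, h'⟩ | ⟨t, ht, _⟩
          · rw [h'] at hVi
            exact absurd hVi (by simp)
          · exact absurd ht (List.not_mem_nil)
        · intro v ⟨⟨hv0, hv1⟩, hPv⟩ _ j hj hmj
          obtain ⟨hj0, hj1⟩ := nbrs_subset w h hw v j hj
          exact ⟨⟨hj0, hj1⟩, rel.closed v hv0 hv1 hPv j hj hmj⟩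
      · exact hvu
    have hsubC : ∀ u ∈ bWhile m w h ((w*h).toNat + 2) [i] [i], 0 ≤ u ∧ u < (V.length : Int) := by
      intro u hu
      obtain ⟨h0, h1, _, _⟩ := memC u hu
      omega
    have hcharVr : ∀ u, 0 ≤ u → u < (V.length : Int) →
        (PySem.List.pyGetD (aWhile m w h ((w*h).toNat + 1) (PySem.List.pySetD V i true) [i] 0).1 u false = true ↔
          PySem.List.pyGetD V u false = true ∨ u ∈ bWhile m w h ((w*h).toNat + 2) [i] [i]) := by
      intro u hu0 hu1
      rw [charF u hu0 (by omega)]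
      constructor
      · rintro (hvu | ⟨s, hs, hr⟩)
        · rw [hv1 u hu0] at hvu
          by_cases he : u = i
          · subst he
            exact Or.inr ((hCchar u).2 Relation.ReflTransGen.refl)
          · rw [if_neg he] at hvu
            exact Or.inl hvu
        · rw [List.mem_singleton] at hs
          subst hs
          exact Or.inr ((hCchar u).2 hr)
      · rintro (hvu | hu)
        · refine Or.inl ?_
          rw [hv1 u hu0]
          by_cases he : u = i
          · rw [if_pos he]
          · rw [if_neg he]
            exact hvu
        · exact Or.inr ⟨i, List.mem_singleton_self i, (hCchar u).1 hu⟩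
    have hcount := count_of_char (bWhile m w h ((w*h).toNat + 2) [i] [i])
      (aWhile m w h ((w*h).toNat + 1) (PySem.List.pySetD V i true) [i] 0).1 V
      (invF.len.trans rel.len.symm) hcharVr ndC hsubC hdisjC
    have hcntV1 : (PySem.List.pySetD V i true).count true = V.count true + 1 :=
      count_true_set V i hi0 hiV hVi
    have harea : (aWhile m w h ((w*h).toNat + 1) (PySem.List.pySetD V i true) [i] 0).2 =
        ((bWhile m w h ((w*h).toNat + 2) [i] [i]).length : Int) := by
      rw [areaF, hcntV1, hcount]
      simp
    have hcondA : (PySem.List.pyGetD V i false || !(PySem.List.pyGetD m i false)) = false := by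
      simp [hVi, hmi]
    have hcondB : (PySem.Set.contains seen i || !(PySem.List.pyGetD m i false)) = false := by
      have : PySem.Set.contains seen i = false := by
        rcases Bool.eq_false_or_eq_true (PySem.Set.contains seen i) with h' | h'
        · exact absurd ((PySem.Set.contains_iff seen i).1 h') hnseen
        · exact h'
      rw [this, hmi]
      rfl
    have hofl : PySem.Set.ofList [i] = [i] := rfl
    refine ⟨(aWhile m w h ((w*h).toNat + 1) (PySem.List.pySetD V i true) [i] 0).1,
      PySem.Set.union seen (bWhile m w h ((w*h).toNat + 2) [i] [i]),
      [((bWhile m w h ((w*h).toNat + 2) [i] [i]).length : Int)], ?_, ?_, ?_⟩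
    · simp only [bodyA, hcondA, Bool.false_eq_true, if_false, harea]
    · simp only [bodyB, hcondB, Bool.false_eq_true, if_false, hofl]
      have : PySem.Set.len (bWhile m w h ((w*h).toNat + 2) [i] [i]) =
          ((bWhile m w h ((w*h).toNat + 2) [i] [i]).length : Int) := rfl
      rw [this]
    · refine ⟨invF.len, ?_, ?_, invF.masked, ?_⟩
      · intro u hu0 hu1
        rw [hcharVr u hu0 (by omega), PySem.Set.mem_union, rel.agree u hu0 hu1]
      · intro u hu
        rw [PySem.Set.mem_union] at hu
        rcases hu with h' | h'
        · exact rel.seenMem u h'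
        · obtain ⟨h0, h1, _, _⟩ := memC u h'
          exact ⟨h0, h1⟩
      · intro u hu0 hu1 hvu j hj hmj
        exact invF.closed u hu0 hu1 hvu (List.not_mem_nil) j hj hmj

theorem loop_sync (m : List Bool) (w h : Int) (hw : 0 < w) (hh : 0 < h)
    (idx : List Int) (hidx : ∀ i ∈ idx, 0 ≤ i ∧ i < w*h) :
    ∀ (V : List Bool) (seen : PySem.Set Int) (out : List Int), ORel m w h V seen →
    (idx.foldl (bodyA m w h) (V, out)).2 = (idx.foldl (bodyB m w h) (seen, out)).2 := by
  induction idx with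
  | nil => intro V seen out _; rfl
  | cons i idx ih =>
    intro V seen out rel
    obtain ⟨hi0, hi1⟩ := hidx i List.mem_cons_self
    obtain ⟨V', seen', app, hA, hB, rel'⟩ := step_sync m w h hw hh i hi0 hi1 V seen rel out out
    simp only [List.foldl_cons, hA, hB]
    exact ih (fun j hj => hidx j (List.mem_cons_of_mem _ hj)) V' seen' (out ++ app) rel'

theorem orel_init (m : List Bool) (w h : Int) :
    ORel m w h (List.replicate (w*h).toNat false) PySem.Set.empty := by
  refine ⟨List.length_replicate, ?_, ?_, ?_, ?_⟩
  · intro u hu0 _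
    rw [vget_replicate _ u hu0]
    constructor
    · intro h'; exact absurd h' (by simp)
    · intro h'; exact absurd h' (List.not_mem_nil)
  · intro u hu
    exact absurd hu (List.not_mem_nil)
  · intro u hu0 _ h'
    rw [vget_replicate _ u hu0] at h'
    exact absurd h' (by simp)
  · intro u hu0 _ h'
    rw [vget_replicate _ u hu0] at h'
    exact absurd h' (by simp)

theorem main_pos (m : List Bool) (w h : Int) (hw : 0 < w) (hh : 0 < h) :
    connected_component_areas_py m w h = connected_component_areas_py_alt m w h := by
  have hguard : ¬ (w ≤ 0 ∨ h ≤ 0) := by omega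
  calc connected_component_areas_py m w h
      = ((PySem.List.pyRange 0 h).foldl (fun s y =>
          (PySem.List.pyRange 0 w).foldl (fun s x => bodyA m w h s (y*w+x)) s)
          (List.replicate (w*h).toNat false, ([] : List Int))).2 := rfl
    _ = ((PySem.List.pyRange 0 (w*h)).foldl (bodyA m w h)
          (List.replicate (w*h).toNat false, ([] : List Int))).2 := by
        rw [foldl_grid w h (le_of_lt hw)]
    _ = ((PySem.List.pyRange 0 (w*h)).foldl (bodyB m w h) (PySem.Set.empty, ([] : List Int))).2 := by
        apply loop_sync m w h hw hh
        · intro i hi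
          rw [PySem.List.mem_pyRange_one] at hi
          omega
        · exact orel_init m w h
    _ = connected_component_areas_py_alt m w h := by
        unfold connected_component_areas_py_alt
        rw [if_neg hguard]
        rfl

theorem main_degenerate (m : List Bool) (w h : Int) (hd : w ≤ 0 ∨ h ≤ 0) :
    connected_component_areas_py m w h = connected_component_areas_py_alt m w h := by
  have hB : connected_component_areas_py_alt m w h = [] := by
    unfold connected_component_areas_py_alt
    rw [if_pos hd]
  rw [hB]
  unfold connected_component_areas_py
  by_cases hh : h ≤ 0
  · rw [PySem.List.pyRange_one_eq_nil hh]
    rfl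
  · have hw : w ≤ 0 := by omega
    rw [PySem.List.pyRange_one_eq_nil (a := 0) (b := w) hw]
    simp only [List.foldl_nil]
    rw [PySem.List.foldl_ignore]

-- ===== VERDICT (by name: the statement is the Claim_ definition above) =====
theorem connected_component_areas_py_spec : Claim_equal_connected_component_areas_py := by
  unfold Claim_equal_connected_component_areas_py
  intro mask width height _ _
  unfold Spec_connected_component_areas_py
  by_cases hw : 0 < width
  · by_cases hh : 0 < height
    · exact main_pos mask width height hw hh
    · exact main_degenerate mask width height (Or.inr (by omega))
  · exact main_degenerate mask width height (Or.inl (by omega))
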